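-- pv_equiv track=rewrite | github.com/Pugsy-Explores/AutoStudio | agent/models/model_client.py | _flatten_messages_with_role_tags
-- ===== SOURCE A (Python) =====
-- def _flatten_messages_with_role_tags(messages: list[dict]) -> str:
--     """
--     Deterministic fallback serialization for backends that do not support role messages.
--     Uses strict tags to reduce role confusion on small models.
--     """
--     system_parts: list[str] = []
--     user_parts: list[str] = []
--     other_parts: list[str] = []
--     for m in messages or []:
--         role = str(m.get("role") or "").strip().lower()
--         content = str(m.get("content") or "")
--         if role == "system":
--             system_parts.append(content)
--         elif role == "user":
--             user_parts.append(content)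
--         else:
--             other_parts.append(content)
--     system_text = "\n\n".join(x for x in system_parts if x.strip()).strip()
--     user_text = "\n\n".join(x for x in user_parts if x.strip()).strip()
--     if other_parts:
--         user_text = (user_text + "\n\n" if user_text else "") + "\n\n".join(
--             x for x in other_parts if x.strip()
--         ).strip()
--     return f"[SYSTEM]\n{system_text}\n\n---\n\n[USER]\n{user_text}".strip()
-- ===== SOURCE B (Python) =====
-- def _flatten_messages_with_role_tags(messages: list[dict]) -> str:
--     """Three-pass re-implementation: one filtered scan per role bucket."""
--     msgs = messages or []
--
--     def role(m):
--         return str(m.get("role") or "").strip().lower()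
--
--     def text(keep):
--         parts = [str(m.get("content") or "") for m in msgs if keep(role(m))]
--         return "\n\n".join(p for p in parts if p.strip()).strip()
--
--     system_text = text(lambda r: r == "system")
--     user_text = text(lambda r: r == "user")
--     if any(role(m) != "system" and role(m) != "user" for m in msgs):
--         other_text = text(lambda r: r != "system" and r != "user")
--         user_text = (user_text + "\n\n" if user_text else "") + other_text
--     return f"[SYSTEM]\n{system_text}\n\n---\n\n[USER]\n{user_text}".strip()
-- ===== Notes on version B (the rewrite author's own statement) =====
-- stated objective: alternative
-- what changed: A fills three buckets in one dispatch loop; B makes three independent filtered passes over the messages (one per role bucket, plus an any() scan for the other-branch guard) and assembles the same tagged string.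
import Mathlib
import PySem

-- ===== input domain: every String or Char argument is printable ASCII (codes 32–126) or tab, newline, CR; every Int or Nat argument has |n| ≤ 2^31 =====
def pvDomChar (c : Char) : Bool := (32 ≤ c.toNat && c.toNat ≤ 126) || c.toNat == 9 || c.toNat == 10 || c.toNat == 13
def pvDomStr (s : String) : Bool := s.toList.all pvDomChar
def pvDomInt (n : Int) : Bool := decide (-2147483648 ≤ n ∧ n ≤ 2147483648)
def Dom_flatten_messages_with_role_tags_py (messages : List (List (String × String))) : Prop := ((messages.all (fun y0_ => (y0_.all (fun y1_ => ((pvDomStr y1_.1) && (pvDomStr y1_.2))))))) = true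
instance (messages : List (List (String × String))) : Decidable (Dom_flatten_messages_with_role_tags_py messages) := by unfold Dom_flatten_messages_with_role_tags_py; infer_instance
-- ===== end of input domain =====

-- B re-serializes by three filtered passes (one per role bucket) instead of A's single bucket-dispatch loop; objective: alternative decomposition, same cost.


-- ===== PORT A =====
-- shared primitive: Python dict.get (first match in the association list), exact for dicts
def pvGet (m : List (String × String)) (k : String) : Option String :=
  match m with
  | [] => none
  | (k', v) :: rest => if k' == k then some v else pvGet rest k

-- str(m.get("role") or "").strip().lower()   (values are strings; `or ""` = default "")
def pvRole (m : List (String × String)) : String :=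
  PySem.Str.lower (PySem.Str.strip ((pvGet m "role").getD ""))

-- str(m.get("content") or "")
def pvContent (m : List (String × String)) : String :=
  (pvGet m "content").getD ""

-- "\n\n".join(x for x in parts if x.strip()).strip()
def pvJoinKept (parts : List String) : String :=
  PySem.Str.strip (PySem.Str.join "\n\n" (parts.filter (fun x => !(PySem.Str.strip x == ""))))

-- the loop body of A: dispatch one message into (system_parts, user_parts, other_parts)
def pvStepA (acc : List String × List String × List String) (m : List (String × String)) :
    List String × List String × List String :=
  let role := pvRole m
  let content := pvContent m
  if role == "system" then (acc.1 ++ [content], acc.2.1, acc.2.2)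
  else if role == "user" then (acc.1, acc.2.1 ++ [content], acc.2.2)
  else (acc.1, acc.2.1, acc.2.2 ++ [content])

def flatten_messages_with_role_tags_py (messages : List (List (String × String))) : String :=
  let acc := messages.foldl pvStepA (([] : List String), ([] : List String), ([] : List String))
  let system_text := pvJoinKept acc.1
  let user_text := pvJoinKept acc.2.1
  let user_text :=
    if acc.2.2 ≠ [] then
      (if !(user_text == "") then user_text ++ "\n\n" else "") ++ pvJoinKept acc.2.2
    else user_text
  PySem.Str.strip ("[SYSTEM]\n" ++ system_text ++ "\n\n---\n\n[USER]\n" ++ user_text)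

-- ===== PORT B =====
-- one pass: the contents of the messages whose normalized role satisfies `keep`, joined
def pvBucket (msgs : List (List (String × String))) (keep : String → Bool) : String :=
  pvJoinKept ((msgs.filter (fun m => keep (pvRole m))).map pvContent)

def flatten_messages_with_role_tags_py_alt (messages : List (List (String × String))) : String :=
  let system_text := pvBucket messages (fun r => r == "system")
  let user_text := pvBucket messages (fun r => r == "user")
  let user_text :=
    if messages.any (fun m => !(pvRole m == "system") && !(pvRole m == "user")) then
      (if !(user_text == "") then user_text ++ "\n\n" else "") ++
        pvBucket messages (fun r => !(r == "system") && !(r == "user"))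
    else user_text
  PySem.Str.strip ("[SYSTEM]\n" ++ system_text ++ "\n\n---\n\n[USER]\n" ++ user_text)

-- ===== PRECONDITION & SPEC =====
def Spec_flatten_messages_with_role_tags_py (messages : List (List (String × String))) (out : String) : Prop := out = flatten_messages_with_role_tags_py_alt messages
instance (messages : List (List (String × String))) (out : String) : Decidable (Spec_flatten_messages_with_role_tags_py messages out) := by unfold Spec_flatten_messages_with_role_tags_py; infer_instance

-- ===== CLAIM (what is proved, stated in full; the proofs are below) =====
def Claim_equal_flatten_messages_with_role_tags_py : Prop := ∀ (messages : List (List (String × String))), Dom_flatten_messages_with_role_tags_py messages → Spec_flatten_messages_with_role_tags_py messages (flatten_messages_with_role_tags_py messages)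

-- ===== LEMMAS AND PROOFS =====

-- A's single loop fills exactly B's three filtered buckets (in order)
theorem pvLoop_eq (msgs : List (List (String × String))) :
    ∀ s u o : List String,
      msgs.foldl pvStepA (s, u, o) =
        (s ++ (msgs.filter (fun m => pvRole m == "system")).map pvContent,
         u ++ (msgs.filter (fun m => pvRole m == "user")).map pvContent,
         o ++ (msgs.filter (fun m => !(pvRole m == "system") && !(pvRole m == "user"))).map pvContent) := by
  induction msgs with
  | nil => intro s u o; simp
  | cons m rest ih =>
    intro s u o
    simp only [List.foldl_cons, pvStepA]
    by_cases h1 : pvRole m == "system"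
    · have hr : pvRole m = "system" := by simpa using h1
      simp [hr, ih, List.append_assoc]
    · have e1 : (pvRole m == "system") = false := by simpa using h1
      by_cases h2 : pvRole m == "user"
      · have hr : pvRole m = "user" := by simpa using h2
        simp [hr, ih, List.append_assoc]
      · have e2 : (pvRole m == "user") = false := by simpa using h2
        simp [e1, e2, ih, List.append_assoc]

theorem pvBucket_nil_iff (msgs : List (List (String × String))) (q : List (String × String) → Bool) :
    ((msgs.filter q).map pvContent = []) ↔ msgs.any q = false := by
  simp [List.filter_eq_nil_iff, List.any_eq_false]

-- ===== VERDICT (by name: the statement is the Claim_ definition above) =====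
theorem flatten_messages_with_role_tags_py_spec : Claim_equal_flatten_messages_with_role_tags_py := by
  intro messages _
  unfold Spec_flatten_messages_with_role_tags_py
  unfold flatten_messages_with_role_tags_py flatten_messages_with_role_tags_py_alt pvBucket
  rw [pvLoop_eq]
  simp only [List.nil_append]
  by_cases h : messages.any (fun m => !(pvRole m == "system") && !(pvRole m == "user")) = true
  · rw [if_pos, if_pos h]
    rw [Ne, pvBucket_nil_iff]
    simp [h]
  · rw [if_neg, if_neg h]
    rw [Ne, pvBucket_nil_iff]
    simp [Bool.eq_false_iff.mpr h]
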